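-- pv_equiv track=rewrite | github.com/DarkCron/PythonBvP | Oefenzitting4/E9A.py | digitNum
-- ===== SOURCE A (Python) =====
-- def digitNum(pCode,n):
--     dn = 0
--     CODELENGTH = 5
--     mod = 1
--     rem = 10
--
--     for amp in range(n,CODELENGTH-1):
--         mod*=10
--         rem*=10
--
--     pCode = pCode % rem
--
--     dn = pCode // mod
--
--     return dn
-- ===== SOURCE B (Python) =====
-- def digitNum(pCode, n):
--     # Strip the low-order digits one at a time, then read the last remaining digit.
--     while n < 4:
--         pCode //= 10
--         n += 1
--     return pCode % 10
-- ===== Notes on version B (the rewrite author's own statement) =====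
-- stated objective: simpler
-- what changed: Instead of accumulating two powers of ten and doing one big mod-then-floordiv like A, B repeatedly floor-divides pCode by 10 to discard the lower digits and returns pCode % 10; no powers or large moduli are ever computed.
import Mathlib
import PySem

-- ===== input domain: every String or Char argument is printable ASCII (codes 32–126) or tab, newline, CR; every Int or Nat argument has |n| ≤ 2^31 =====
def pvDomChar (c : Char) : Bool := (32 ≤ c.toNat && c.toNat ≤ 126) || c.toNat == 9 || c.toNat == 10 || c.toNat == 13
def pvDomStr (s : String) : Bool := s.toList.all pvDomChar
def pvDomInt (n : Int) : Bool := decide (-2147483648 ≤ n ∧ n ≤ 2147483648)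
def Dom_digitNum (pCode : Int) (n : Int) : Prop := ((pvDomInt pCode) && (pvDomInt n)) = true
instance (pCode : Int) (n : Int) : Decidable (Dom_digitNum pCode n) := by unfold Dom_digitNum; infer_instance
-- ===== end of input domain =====

-- B strips low-order digits by repeated floor division instead of A's power accumulation + one big mod/div (simpler).

-- ===== PORT A =====
-- the loop 'for amp in range(n, CODELENGTH-1): mod*=10; rem*=10' as a fold over the same range
def digitNum (pCode : Int) (n : Int) : Int :=
  let mr := (PySem.List.pyRange n 4 1).foldl (fun (p : Int × Int) _ => (p.1 * 10, p.2 * 10)) (1, 10)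
  let pCode' := PySem.Int.mod pCode mr.2
  PySem.Int.floordiv pCode' mr.1

-- ===== PORT B =====
-- the 'while n < 4: pCode //= 10; n += 1' loop, fuel = number of iterations (4 - n, clamped at 0)
def digitNumPeel : Nat → Int → Int
  | 0, p => PySem.Int.mod p 10
  | k + 1, p => digitNumPeel k (PySem.Int.floordiv p 10)

def digitNum_alt (pCode : Int) (n : Int) : Int :=
  digitNumPeel (4 - n).toNat pCode

-- ===== PRECONDITION & SPEC =====
def Spec_digitNum (pCode : Int) (n : Int) (out : Int) : Prop := out = digitNum_alt pCode n
instance (pCode : Int) (n : Int) (out : Int) : Decidable (Spec_digitNum pCode n out) := by unfold Spec_digitNum; infer_instance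

-- ===== CLAIM =====
def Claim_equal_digitNum : Prop := ∀ (pCode : Int) (n : Int), Dom_digitNum pCode n → Spec_digitNum pCode n (digitNum pCode n)

-- ===== LEMMAS AND PROOFS =====

-- A's fold ignores the range elements: only the iteration count matters
theorem pv_foldl_mul10 (l : List Int) (a b : Int) :
    l.foldl (fun (p : Int × Int) _ => (p.1 * 10, p.2 * 10)) (a, b)
      = (a * 10 ^ l.length, b * 10 ^ l.length) := by
  induction l generalizing a b with
  | nil => simp
  | cons x xs ih => simp [List.foldl, ih, pow_succ]; constructor <;> ring

-- the digit Python reads through % (10*m) then // m is the one through // m then % 10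
theorem pv_emod_ediv (p m : Int) (h : 0 < m) : p % (10 * m) / m = p / m % 10 := by
  have hq : p = p % (10 * m) + (10 * m) * (p / (10 * m)) := (Int.emod_add_mul_ediv p (10 * m)).symm
  have hr0 : 0 ≤ p % (10 * m) := Int.emod_nonneg p (by positivity)
  have hr1 : p % (10 * m) < 10 * m := Int.emod_lt_of_pos p (by linarith)
  have hdm : p / m = p % (10 * m) / m + 10 * (p / (10 * m)) := by
    conv_lhs => rw [hq]
    rw [show (10 * m) * (p / (10 * m)) = (10 * (p / (10 * m))) * m by ring,
        Int.add_mul_ediv_right _ _ (ne_of_gt h)]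
  have hd0 : 0 ≤ p % (10 * m) / m := Int.ediv_nonneg hr0 h.le
  have hd1 : p % (10 * m) / m < 10 := Int.ediv_lt_of_lt_mul h (by linarith)
  omega

-- B's peeling loop computes exactly A's mod-then-div expression
theorem pv_peel_eq (k : Nat) (p : Int) :
    digitNumPeel k p = PySem.Int.floordiv (PySem.Int.mod p (10 * 10 ^ k)) (10 ^ k) := by
  induction k generalizing p with
  | zero =>
      simp [digitNumPeel, PySem.Int.floordiv]
  | succ k ih =>
      have hm : (0 : Int) < 10 ^ k := by positivity
      rw [digitNumPeel, ih,
          PySem.Int.floordiv_eq_ediv_of_pos (by norm_num : (0:Int) < 10),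
          PySem.Int.mod_eq_emod_of_pos (by positivity),
          PySem.Int.mod_eq_emod_of_pos (by positivity),
          PySem.Int.floordiv_eq_ediv_of_pos hm,
          PySem.Int.floordiv_eq_ediv_of_pos (by positivity)]
      rw [pv_emod_ediv _ _ hm, pv_emod_ediv _ _ (by positivity)]
      rw [Int.ediv_ediv_of_nonneg (by norm_num : (0:Int) ≤ 10)]
      ring_nf

-- ===== VERDICT =====
theorem digitNum_spec : Claim_equal_digitNum := by
  intro pCode n _
  show digitNum pCode n = digitNum_alt pCode n
  unfold digitNum digitNum_alt
  rw [pv_foldl_mul10, PySem.List.length_pyRange_one, pv_peel_eq]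
  simp
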